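-- pv_equiv track=rewrite | github.com/IronAdamant/Tramel | trammel/scaffold_templates.py | _detect_role_keywords
-- ===== SOURCE A (Python) =====
-- def _detect_role_keywords(goal_keywords: set[str], role_keywords: set[str]) -> bool:
--     """True if any goal keyword matches a role keyword (including simple variants)."""
--     variants: set[str] = set()
--     for kw in goal_keywords:
--         variants.add(kw)
--         variants.add(kw + "s")
--         if kw.endswith("s"):
--             variants.add(kw[:-1])
--     return bool(variants & role_keywords)
-- ===== SOURCE B (Python) =====
-- def _detect_role_keywords(goal_keywords: set[str], role_keywords: set[str]) -> bool:
--     """True if any goal keyword matches a role keyword (including simple variants)."""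
--     return any(
--         r in goal_keywords
--         or (r.endswith("s") and r[:-1] in goal_keywords)
--         or (r + "s") in goal_keywords
--         for r in role_keywords
--     )
-- ===== Notes on version B (the rewrite author's own statement) =====
-- stated objective: idiomatic
-- what changed: Instead of materialising a variant set from the goal keywords and intersecting it with the role keywords, B iterates over the role keywords with any() and tests the three inverted variant rules (exact match, role plural of a goal, role singular of a goal) directly against the untouched goal set, building no intermediate set and short-circuiting on the first hit.
import Mathlib
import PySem

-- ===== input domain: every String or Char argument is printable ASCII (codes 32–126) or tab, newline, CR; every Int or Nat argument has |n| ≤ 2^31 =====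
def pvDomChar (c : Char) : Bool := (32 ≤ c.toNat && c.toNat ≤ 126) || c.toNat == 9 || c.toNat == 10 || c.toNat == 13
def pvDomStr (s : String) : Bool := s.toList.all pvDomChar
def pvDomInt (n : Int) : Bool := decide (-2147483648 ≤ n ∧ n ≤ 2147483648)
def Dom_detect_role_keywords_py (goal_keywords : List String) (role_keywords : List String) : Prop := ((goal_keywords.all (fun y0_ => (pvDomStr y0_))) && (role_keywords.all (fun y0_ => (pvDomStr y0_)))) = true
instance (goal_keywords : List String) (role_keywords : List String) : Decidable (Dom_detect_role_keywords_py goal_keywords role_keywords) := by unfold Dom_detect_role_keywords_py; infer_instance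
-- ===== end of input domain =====

-- B inverts the variant rules: instead of building a variant set from the goal keywords and
-- intersecting it with the role keywords, it short-circuits over the role keywords testing the
-- three inverse conditions against the untouched goal set (same behaviour, no intermediate set).

-- ===== PORT A =====
-- one iteration of A's loop body: variants.add(kw); variants.add(kw+"s"); if kw.endswith("s"): variants.add(kw[:-1])
def detectRoleStep (v : PySem.Set String) (kw : String) : PySem.Set String :=
  let v := PySem.Set.add v kw
  let v := PySem.Set.add v (kw ++ "s")
  if PySem.Str.endswith kw "s" then PySem.Set.add v (PySem.Str.slice kw none (some (-1))) else v

def detect_role_keywords_py (goal_keywords : List String) (role_keywords : List String) : Bool :=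
  let variants : PySem.Set String := goal_keywords.foldl detectRoleStep PySem.Set.empty
  -- bool(variants & role_keywords): truthiness of a set = non-emptiness
  !(PySem.Set.inter variants role_keywords).isEmpty

-- ===== PORT B =====
def detect_role_keywords_py_alt (goal_keywords : List String) (role_keywords : List String) : Bool :=
  role_keywords.any (fun r =>
    goal_keywords.contains r
    || (PySem.Str.endswith r "s" && goal_keywords.contains (PySem.Str.slice r none (some (-1))))
    || goal_keywords.contains (r ++ "s"))

-- ===== PRECONDITION & SPEC =====
def Spec_detect_role_keywords_py (goal_keywords : List String) (role_keywords : List String) (out : Bool) : Prop := out = detect_role_keywords_py_alt goal_keywords role_keywords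
instance (goal_keywords : List String) (role_keywords : List String) (out : Bool) : Decidable (Spec_detect_role_keywords_py goal_keywords role_keywords out) := by unfold Spec_detect_role_keywords_py; infer_instance

-- ===== CLAIM (what is proved, stated in full; the proofs are below) =====
def Claim_equal_detect_role_keywords_py : Prop := ∀ (goal_keywords : List String) (role_keywords : List String), Dom_detect_role_keywords_py goal_keywords role_keywords → Spec_detect_role_keywords_py goal_keywords role_keywords (detect_role_keywords_py goal_keywords role_keywords)

-- ===== LEMMAS AND PROOFS =====

-- s = t ++ "s"  ↔  s ends with "s" and s[:-1] = t  (the inversion B relies on)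
theorem append_s_iff (s t : String) :
    s = t ++ "s" ↔ (PySem.Str.endswith s "s" = true ∧ PySem.Str.slice s none (some (-1)) = t) := by
  constructor
  · rintro rfl
    constructor
    · rw [PySem.Str.endswith_eq, PySem.Chars.endswith_iff]
      simp
    · apply String.toList_inj.mp
      rw [PySem.Str.slice_to_neg_one]
      simp
  · rintro ⟨he, hs⟩
    rw [PySem.Str.endswith_eq, PySem.Chars.endswith_iff] at he
    obtain ⟨p, hp⟩ := he
    apply String.toList_inj.mp
    have hdl : (PySem.Str.slice s none (some (-1))).toList = s.toList.dropLast :=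
      PySem.Str.slice_to_neg_one s
    have ht : t.toList = s.toList.dropLast := by rw [← hs, hdl]
    simp only [String.toList_append]
    have : s.toList = p ++ "s".toList := hp.symm
    rw [this, ht, this]
    simp

-- what A's loop puts into `variants`
theorem mem_detectRoleStep (v : PySem.Set String) (kw x : String) :
    x ∈ detectRoleStep v kw ↔
      x ∈ v ∨ x = kw ∨ x = kw ++ "s" ∨
        (PySem.Str.endswith kw "s" = true ∧ x = PySem.Str.slice kw none (some (-1))) := by
  unfold detectRoleStep
  split
  · rename_i h
    simp only [PySem.Set.mem_add, h]
    tauto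
  · rename_i h
    simp only [PySem.Set.mem_add]
    constructor
    · tauto
    · rintro (h1 | h1 | h1 | ⟨h1, _⟩)
      · tauto
      · tauto
      · tauto
      · exact absurd h1 h

theorem mem_foldl_detectRoleStep (gs : List String) (init : PySem.Set String) (x : String) :
    x ∈ gs.foldl detectRoleStep init ↔
      x ∈ init ∨ ∃ kw ∈ gs, x = kw ∨ x = kw ++ "s" ∨
        (PySem.Str.endswith kw "s" = true ∧ x = PySem.Str.slice kw none (some (-1))) := by
  induction gs generalizing init with
  | nil => simp
  | cons a gs ih =>
    simp only [List.foldl_cons, ih, mem_detectRoleStep, List.mem_cons]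
    constructor
    · rintro ((h | h) | ⟨kw, hkw, hx⟩)
      · exact Or.inl h
      · exact Or.inr ⟨a, Or.inl rfl, h⟩
      · exact Or.inr ⟨kw, Or.inr hkw, hx⟩
    · rintro (h | ⟨kw, (rfl | hkw), hx⟩)
      · exact Or.inl (Or.inl h)
      · exact Or.inl (Or.inr hx)
      · exact Or.inr ⟨kw, hkw, hx⟩

-- ===== VERDICT (by name: the statement is the Claim_ definition above) =====
theorem detect_role_keywords_py_spec : Claim_equal_detect_role_keywords_py := by
  intro gs rs _
  show detect_role_keywords_py gs rs = detect_role_keywords_py_alt gs rs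
  have hA : (detect_role_keywords_py gs rs = true) ↔
      ∃ x, x ∈ gs.foldl detectRoleStep PySem.Set.empty ∧ x ∈ rs := by
    unfold detect_role_keywords_py
    simp only [Bool.not_eq_true', List.isEmpty_eq_false_iff_exists_mem]
    constructor
    · rintro ⟨x, hx⟩; exact ⟨x, (PySem.Set.mem_inter _ _ _).mp hx⟩
    · rintro ⟨x, hx⟩; exact ⟨x, (PySem.Set.mem_inter _ _ _).mpr hx⟩
  have hB : (detect_role_keywords_py_alt gs rs = true) ↔
      ∃ r, r ∈ rs ∧
        ((r ∈ gs ∨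
          (PySem.Str.endswith r "s" = true ∧ PySem.Str.slice r none (some (-1)) ∈ gs)) ∨
         (r ++ "s") ∈ gs) := by
    unfold detect_role_keywords_py_alt
    simp only [List.any_eq_true, Bool.or_eq_true, Bool.and_eq_true, List.contains_iff_mem]
  rw [Bool.eq_iff_iff, hA, hB]
  constructor
  · rintro ⟨x, hx, hxr⟩
    rw [mem_foldl_detectRoleStep] at hx
    rcases hx with h | ⟨kw, hkw, (rfl | rfl | ⟨he, rfl⟩)⟩
    · exact absurd h (by simp [PySem.Set.empty])
    · exact ⟨x, hxr, Or.inl (Or.inl hkw)⟩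
    · refine ⟨kw ++ "s", hxr, Or.inl (Or.inr ?_)⟩
      have h2 := (append_s_iff (kw ++ "s") kw).mp rfl
      refine ⟨h2.1, ?_⟩
      rw [h2.2]
      exact hkw
    · refine ⟨PySem.Str.slice kw none (some (-1)), hxr, Or.inr ?_⟩
      have h2 : kw = PySem.Str.slice kw none (some (-1)) ++ "s" :=
        (append_s_iff kw (PySem.Str.slice kw none (some (-1)))).mpr ⟨he, rfl⟩
      rwa [← h2]
  · rintro ⟨r, hr, ((hg | ⟨he, hg⟩) | hg)⟩
    · exact ⟨r, (mem_foldl_detectRoleStep gs PySem.Set.empty r).mpr (Or.inr ⟨r, hg, Or.inl rfl⟩), hr⟩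
    · refine ⟨r, (mem_foldl_detectRoleStep gs PySem.Set.empty r).mpr
        (Or.inr ⟨PySem.Str.slice r none (some (-1)), hg, Or.inr (Or.inl ?_)⟩), hr⟩
      exact (append_s_iff r (PySem.Str.slice r none (some (-1)))).mpr ⟨he, rfl⟩
    · refine ⟨r, (mem_foldl_detectRoleStep gs PySem.Set.empty r).mpr
        (Or.inr ⟨r ++ "s", hg, Or.inr (Or.inr ?_)⟩), hr⟩
      have h2 := (append_s_iff (r ++ "s") r).mp rfl
      exact ⟨h2.1, h2.2.symm⟩
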